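-- pv_equiv track=rewrite | github.com/techwiz42/thanotopolis | backend/app/agents/demo_answering_service_agent.py | get_handoff_agent
-- ===== SOURCE A (Python) =====
-- from typing import Dict, Any, Optional, List
--
-- def get_handoff_agent(query: str) -> Optional[str]:
--     """Determine if the query should be handed off to a specialist agent."""
--     query_lower = query.lower()
--
--     # Quick keyword matching for handoffs
--     if any(word in query_lower for word in ['payment', 'cost', 'price', 'insurance', 'billing']):
--         return 'FINANCIAL_SERVICES'
--     elif any(word in query_lower for word in ['inventory', 'facilities', 'equipment', 'supplies']):
--         return 'INVENTORY'
--     elif any(word in query_lower for word in ['compliance', 'regulation', 'legal', 'documentation']):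
--         return 'COMPLIANCE'
--     elif any(word in query_lower for word in ['emergency', 'urgent', 'crisis', 'immediate']):
--         return 'EMERGENCY'
--
--     return None
-- ===== SOURCE B (Python) =====
-- # B: single full pass over a flat (keyword, rank) list keeping the minimum
-- # matched rank, then one indexed lookup -- no ordered branch chain, no early return.
-- KEYWORD_RANK = [
--     ('payment', 0), ('cost', 0), ('price', 0), ('insurance', 0), ('billing', 0),
--     ('inventory', 1), ('facilities', 1), ('equipment', 1), ('supplies', 1),
--     ('compliance', 2), ('regulation', 2), ('legal', 2), ('documentation', 2),
--     ('emergency', 3), ('urgent', 3), ('crisis', 3), ('immediate', 3),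
-- ]
-- LABELS = ['FINANCIAL_SERVICES', 'INVENTORY', 'COMPLIANCE', 'EMERGENCY']
--
-- def get_handoff_agent(query: str):
--     """Determine if the query should be handed off to a specialist agent."""
--     query_lower = query.lower()
--     best = None
--     for word, rank in KEYWORD_RANK:
--         if word in query_lower and (best is None or rank < best):
--             best = rank
--     return None if best is None else LABELS[best]
-- ===== Notes on version B (the rewrite author's own statement) =====
-- stated objective: alternative
-- what changed: Replaced the priority-ordered if/elif early-return chain with a single full pass over a flat (keyword, rank) list that keeps the minimum matched rank in an accumulator and finishes with one indexed label lookup; correct because each branch's keywords carry its branch index as rank, so the minimum matched rank is exactly the first branch A's chain would take.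
import Mathlib
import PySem

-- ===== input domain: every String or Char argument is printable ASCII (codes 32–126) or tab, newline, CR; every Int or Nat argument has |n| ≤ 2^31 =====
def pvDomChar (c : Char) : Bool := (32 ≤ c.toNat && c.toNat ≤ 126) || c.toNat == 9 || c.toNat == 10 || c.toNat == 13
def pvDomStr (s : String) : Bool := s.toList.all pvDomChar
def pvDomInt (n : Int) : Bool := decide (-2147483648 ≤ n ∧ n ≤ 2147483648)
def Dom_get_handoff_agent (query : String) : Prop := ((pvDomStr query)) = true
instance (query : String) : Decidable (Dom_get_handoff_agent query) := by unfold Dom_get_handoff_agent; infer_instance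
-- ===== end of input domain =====

-- B replaces the if/elif early-return chain by a min-rank accumulator over a flat keyword list; alternative, same cost.

-- ===== PORT A =====
def get_handoff_agent (query : String) : Option String :=
  let query_lower := PySem.Str.lower query
  if ["payment", "cost", "price", "insurance", "billing"].any (fun word => PySem.Str.isIn word query_lower) then
    some "FINANCIAL_SERVICES"
  else if ["inventory", "facilities", "equipment", "supplies"].any (fun word => PySem.Str.isIn word query_lower) then
    some "INVENTORY"
  else if ["compliance", "regulation", "legal", "documentation"].any (fun word => PySem.Str.isIn word query_lower) then
    some "COMPLIANCE"
  else if ["emergency", "urgent", "crisis", "immediate"].any (fun word => PySem.Str.isIn word query_lower) then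
    some "EMERGENCY"
  else
    none

-- ===== PORT B =====
def kwRank : List (String × Nat) :=
  [("payment", 0), ("cost", 0), ("price", 0), ("insurance", 0), ("billing", 0),
   ("inventory", 1), ("facilities", 1), ("equipment", 1), ("supplies", 1),
   ("compliance", 2), ("regulation", 2), ("legal", 2), ("documentation", 2),
   ("emergency", 3), ("urgent", 3), ("crisis", 3), ("immediate", 3)]

def handoffLabels : List String :=
  ["FINANCIAL_SERVICES", "INVENTORY", "COMPLIANCE", "EMERGENCY"]

-- the loop body: keep the smallest rank whose keyword occurs in the query
def hoStep (q : String) (best : Option Nat) (p : String × Nat) : Option Nat :=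
  if PySem.Str.isIn p.1 q && (match best with | none => true | some b => decide (p.2 < b)) then
    some p.2
  else best

def get_handoff_agent_alt (query : String) : Option String :=
  let query_lower := PySem.Str.lower query
  let best := kwRank.foldl (hoStep query_lower) none
  match best with
  | none => none
  | some r => some (handoffLabels.getD r "")

-- ===== PRECONDITION & SPEC =====
def Spec_get_handoff_agent (query : String) (out : Option String) : Prop := out = get_handoff_agent_alt query
instance (query : String) (out : Option String) : Decidable (Spec_get_handoff_agent query out) := by unfold Spec_get_handoff_agent; infer_instance

-- ===== CLAIM (what is proved, stated in full; the proofs are below) =====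
def Claim_equal_get_handoff_agent : Prop := ∀ (query : String), Dom_get_handoff_agent query → Spec_get_handoff_agent query (get_handoff_agent query)

-- ===== LEMMAS AND PROOFS =====

-- Once the accumulator holds some r and every remaining rank is ≥ r, the fold leaves it unchanged.
theorem hoStep_absorbed (q : String) (r : Nat) (ps : List (String × Nat))
    (h : ∀ p ∈ ps, r ≤ p.2) : ps.foldl (hoStep q) (some r) = some r := by
  induction ps with
  | nil => rfl
  | cons p ps ih =>
    have hr : ¬ p.2 < r := not_lt.mpr (h p (List.mem_cons_self))
    simp only [List.foldl_cons, hoStep, hr, decide_false, Bool.and_false, Bool.false_eq_true,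
      if_false]
    exact ih (fun p hp => h p (List.mem_cons_of_mem _ hp))

-- Folding from none over one constant-rank group yields some r iff some keyword matches.
theorem hoStep_group (q : String) (r : Nat) (ws : List String) :
    (ws.map (fun w => (w, r))).foldl (hoStep q) none =
      if ws.any (fun w => PySem.Str.isIn w q) then some r else none := by
  induction ws with
  | nil => rfl
  | cons w ws ih =>
    simp only [List.map_cons, List.foldl_cons, List.any_cons]
    by_cases h : PySem.Str.isIn w q = true
    · simp only [hoStep, h, Bool.true_and, Bool.true_or, if_true]
      rw [hoStep_absorbed q r _ (by
        intro p hp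
        obtain ⟨w', -, rfl⟩ := List.mem_map.mp hp
        exact le_refl r)]
    · simp only [hoStep, Bool.false_or, h]
      simpa using ih

theorem kwRank_split :
    kwRank = (["payment", "cost", "price", "insurance", "billing"].map (fun w => (w, 0)))
      ++ (["inventory", "facilities", "equipment", "supplies"].map (fun w => (w, 1)))
      ++ (["compliance", "regulation", "legal", "documentation"].map (fun w => (w, 2)))
      ++ (["emergency", "urgent", "crisis", "immediate"].map (fun w => (w, 3))) := rfl

-- Closed form of B's fold: the minimum matched rank is the first matching group, in order.
theorem foldB (ql : String) :
    kwRank.foldl (hoStep ql) none =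
      if ["payment", "cost", "price", "insurance", "billing"].any (fun w => PySem.Str.isIn w ql) then some 0
      else if ["inventory", "facilities", "equipment", "supplies"].any (fun w => PySem.Str.isIn w ql) then some 1
      else if ["compliance", "regulation", "legal", "documentation"].any (fun w => PySem.Str.isIn w ql) then some 2
      else if ["emergency", "urgent", "crisis", "immediate"].any (fun w => PySem.Str.isIn w ql) then some 3
      else none := by
  rw [kwRank_split]
  simp only [List.append_assoc, List.foldl_append, hoStep_group]
  by_cases h0 : (["payment", "cost", "price", "insurance", "billing"].any (fun w => PySem.Str.isIn w ql)) = true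
  · simp only [h0, if_true]
    rw [hoStep_absorbed ql 0 _ (fun p _ => Nat.zero_le _),
      hoStep_absorbed ql 0 _ (fun p _ => Nat.zero_le _),
      hoStep_absorbed ql 0 _ (fun p _ => Nat.zero_le _)]
  · simp only [h0, Bool.false_eq_true, if_false]
    rw [hoStep_group]
    by_cases h1 : (["inventory", "facilities", "equipment", "supplies"].any (fun w => PySem.Str.isIn w ql)) = true
    · simp only [h1, if_true]
      rw [hoStep_absorbed ql 1 _ (by intro p hp; obtain ⟨w', -, rfl⟩ := List.mem_map.mp hp; omega),
        hoStep_absorbed ql 1 _ (by intro p hp; obtain ⟨w', -, rfl⟩ := List.mem_map.mp hp; omega)]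
    · simp only [h1, Bool.false_eq_true, if_false]
      rw [hoStep_group]
      by_cases h2 : (["compliance", "regulation", "legal", "documentation"].any (fun w => PySem.Str.isIn w ql)) = true
      · simp only [h2, if_true]
        rw [hoStep_absorbed ql 2 _ (by intro p hp; obtain ⟨w', -, rfl⟩ := List.mem_map.mp hp; omega)]
      · simp only [h2, Bool.false_eq_true, if_false]
        rw [hoStep_group]

-- ===== VERDICT (by name: the statement is the Claim_ definition above) =====
theorem get_handoff_agent_spec : Claim_equal_get_handoff_agent := by
  intro query _
  unfold Spec_get_handoff_agent get_handoff_agent get_handoff_agent_alt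
  simp only [foldB]
  split_ifs <;> rfl
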